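-- pv_equiv track=rewrite | github.com/peekxc/splex | src/splex/combinatorial.py | unrank_lex
-- ===== SOURCE A (Python) =====
-- from math import comb, factorial
--
-- def unrank_lex(r: int, k: int, n: int):
--   result = [0]*k
--   x = 1
--   for i in range(1, k+1):
--     while(r >= comb(n-x, k-i)):
--       r -= comb(n-x, k-i)
--       x += 1
--     result[i-1] = (x - 1)
--     x += 1
--   return tuple(result)
-- ===== SOURCE B (Python) =====
-- from math import comb
--
-- def unrank_lex(r: int, k: int, n: int):
--   out = []
--   lo = 0
--   for i in range(1, k + 1):
--     j = k - i
--     S = comb(n - lo, j + 1)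
--     # digit = largest d in [lo, n-j-1] with comb(n-d, j+1) >= S - r
--     a, b = lo, n - j - 1
--     while a < b:
--       mid = (a + b + 1) // 2
--       if comb(n - mid, j + 1) >= S - r:
--         a = mid
--       else:
--         b = mid - 1
--     out.append(a)
--     r -= S - comb(n - a, j + 1)
--     lo = a + 1
--   return tuple(out)
-- ===== Notes on version B (the rewrite author's own statement) =====
-- stated objective: alternative
-- what changed: Per digit, A linearly subtracts comb(n-x,k-i) one value at a time; B collapses that scan into a hockey-stick closed form and binary-searches the digit over the monotone values comb(n-d,j+1); measured cost is similar since A's scan pointer is amortized across digits.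
import Mathlib
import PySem

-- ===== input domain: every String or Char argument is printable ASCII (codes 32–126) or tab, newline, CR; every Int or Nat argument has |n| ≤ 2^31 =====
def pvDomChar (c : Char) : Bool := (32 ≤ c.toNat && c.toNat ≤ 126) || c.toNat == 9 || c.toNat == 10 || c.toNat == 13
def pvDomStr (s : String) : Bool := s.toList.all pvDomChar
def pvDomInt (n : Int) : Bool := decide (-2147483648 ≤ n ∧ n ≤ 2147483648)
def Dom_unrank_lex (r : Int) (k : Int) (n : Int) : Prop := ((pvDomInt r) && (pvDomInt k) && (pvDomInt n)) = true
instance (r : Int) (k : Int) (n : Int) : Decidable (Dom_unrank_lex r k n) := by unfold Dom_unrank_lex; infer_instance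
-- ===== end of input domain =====

-- B replaces A's per-digit linear scan (repeatedly subtracting comb(n-x, k-i)) by a hockey-stick
-- closed form plus a binary search for each digit over the monotone values comb(n-d, j+1)
-- (alternative algorithm, similar measured cost).

-- ===== PORT A =====
-- math.comb, exact on the nonnegative arguments reachable inside Pre_ (Python raises on negative
-- arguments; Pre_ excludes exactly the inputs where A hits such a call).
def pycomb (a b : Int) : Int := (a.toNat.choose b.toNat : Int)

-- 'while r >= comb(n-x, k-i): r -= comb(n-x, k-i); x += 1'.
-- Fuel guard only (the loop body is Python's): (n - x + 1).toNat + 1 steps cover every run on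
-- which Python terminates, since Python's comb raises once x exceeds n.
def unrankA_while (n j : Int) : Nat → Int → Int → Int × Int
  | 0, r, x => (r, x)
  | fuel + 1, r, x =>
    if pycomb (n - x) j ≤ r then unrankA_while n j fuel (r - pycomb (n - x) j) (x + 1)
    else (r, x)

-- 'for i in range(1, k+1)', counted by m = remaining iterations (so k - i = m - 1);
-- result[i-1] = x* - 1 is emitted in order, then x = x* + 1.
def unrankA_go (n : Int) : Nat → Int → Int → List Int
  | 0, _, _ => []
  | m + 1, r, x =>
    let p := unrankA_while n (m : Int) ((n - x + 1).toNat + 1) r x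
    (p.2 - 1) :: unrankA_go n m p.1 (p.2 + 1)

def unrank_lex (r : Int) (k : Int) (n : Int) : List Int := unrankA_go n k.toNat r 1

-- ===== PORT B =====
-- 'while a < b: mid = (a+b+1)//2; …' from Source B; fuel (b - a).toNat + 1 covers every run
-- (the bracket shrinks at each step, so Python always terminates in that many steps).
def binsearch (n jp target : Int) : Nat → Int → Int → Int
  | 0, a, _ => a
  | fuel + 1, a, b =>
    if a < b then
      let mid := PySem.Int.floordiv (a + b + 1) 2
      if target ≤ pycomb (n - mid) jp then binsearch n jp target fuel mid b
      else binsearch n jp target fuel a (mid - 1)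
    else a

-- Source B's 'for i in range(1, k+1)' with j = k - i, counted by m = remaining iterations (j = m - 1)
def unrankB_go (n : Int) : Nat → Int → Int → List Int
  | 0, _, _ => []
  | m + 1, r, lo =>
    let j : Int := (m : Int)
    let S := pycomb (n - lo) (j + 1)
    let hi := n - j - 1
    let a := binsearch n (j + 1) (S - r) ((hi - lo).toNat + 1) lo hi
    a :: unrankB_go n m (r - (S - pycomb (n - a) (j + 1))) (a + 1)

def unrank_lex_alt (r : Int) (k : Int) (n : Int) : List Int := unrankB_go n k.toNat r 0

-- ===== PRECONDITION & SPEC =====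
-- Exactly the inputs on which Python's A returns: for k ≤ 0 it always returns (); for k ≥ 1 it
-- returns iff k ≤ n and r < C(n,k) (otherwise math.comb is eventually called with a negative
-- first argument and raises ValueError).
def Pre_unrank_lex (r : Int) (k : Int) (n : Int) : Prop :=
  k ≤ 0 ∨ (k ≤ n ∧ r < (n.toNat.choose k.toNat : Int))
instance (r : Int) (k : Int) (n : Int) : Decidable (Pre_unrank_lex r k n) := by
  unfold Pre_unrank_lex; infer_instance

def pvWitness_unrank_lex : Int × Int × Int := (2, 2, 4)

def Spec_unrank_lex (r : Int) (k : Int) (n : Int) (out : List Int) : Prop := out = unrank_lex_alt r k n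
instance (r : Int) (k : Int) (n : Int) (out : List Int) : Decidable (Spec_unrank_lex r k n out) := by unfold Spec_unrank_lex; infer_instance

-- ===== CLAIM (what is proved, stated in full; the proofs are below) =====
def Claim_equal_unrank_lex : Prop := ∀ (r : Int) (k : Int) (n : Int), Dom_unrank_lex r k n → Pre_unrank_lex r k n → Spec_unrank_lex r k n (unrank_lex r k n)

-- ===== LEMMAS AND PROOFS =====

lemma pycomb_nonneg (a b : Int) : 0 ≤ pycomb a b := Int.natCast_nonneg _

lemma pycomb_mono_left {a b : Int} (c : Int) (h : a ≤ b) : pycomb a c ≤ pycomb b c := by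
  unfold pycomb
  exact_mod_cast Nat.choose_le_choose c.toNat (by omega)

lemma pycomb_pascal {m j : Int} (hm : 1 ≤ m) (hj : 0 ≤ j) :
    pycomb m (j + 1) = pycomb (m - 1) j + pycomb (m - 1) (j + 1) := by
  unfold pycomb
  have h1 : m.toNat = (m - 1).toNat + 1 := by omega
  have h2 : (j + 1).toNat = j.toNat + 1 := by omega
  rw [h1, h2, Nat.choose_succ_succ]
  push_cast; ring

lemma pycomb_self (j : Int) : pycomb j j = 1 := by
  unfold pycomb; rw [Nat.choose_self]; rfl

-- A's inner while loop: exact characterisation on valid states.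
lemma Awhile_spec (n j : Int) (hj : 0 ≤ j) :
    ∀ (fuel : Nat) (r x : Int), 0 ≤ r → r < pycomb (n - x + 1) (j + 1) → x ≤ n - j →
      (n - j - x).toNat + 1 ≤ fuel →
      ∃ d : Int, unrankA_while n j fuel r x
          = (r - (pycomb (n - x + 1) (j + 1) - pycomb (n - d) (j + 1)), d + 1)
        ∧ x - 1 ≤ d ∧ d ≤ n - j - 1
        ∧ 0 ≤ r - (pycomb (n - x + 1) (j + 1) - pycomb (n - d) (j + 1))
        ∧ r - (pycomb (n - x + 1) (j + 1) - pycomb (n - d) (j + 1)) < pycomb (n - d - 1) j := by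
  intro fuel
  induction fuel with
  | zero => intro r x _ _ _ hf; omega
  | succ f ih =>
    intro r x hr hrS hx hf
    simp only [unrankA_while]
    split_ifs with hcond
    · -- loop body runs: x cannot already be at the right end
      have hx' : x + 1 ≤ n - j := by
        by_contra hc
        have hxe : n - x = j := by omega
        have h1 : pycomb (n - x + 1) (j + 1) = 1 := by
          rw [hxe]; exact pycomb_self _
        have h2 : pycomb (n - x) j = 1 := by rw [hxe]; exact pycomb_self _
        omega
      have hp : pycomb (n - x + 1) (j + 1) = pycomb (n - x) j + pycomb (n - x) (j + 1) := by
        have := pycomb_pascal (m := n - x + 1) (j := j) (by omega) hj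
        have e : n - x + 1 - 1 = n - x := by ring
        rw [e] at this
        exact this
      have hrS' : r - pycomb (n - x) j < pycomb (n - (x + 1) + 1) (j + 1) := by
        have e : n - (x + 1) + 1 = n - x := by ring
        rw [e]; omega
      obtain ⟨d, heq, hd1, hd2, hd3, hd4⟩ :=
        ih (r - pycomb (n - x) j) (x + 1) (by omega) hrS' hx' (by omega)
      have e : n - (x + 1) + 1 = n - x := by ring
      rw [e] at heq hd3 hd4
      refine ⟨d, ?_, by omega, hd2, by omega, by omega⟩
      rw [heq]
      have : r - pycomb (n - x) j - (pycomb (n - x) (j + 1) - pycomb (n - d) (j + 1))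
          = r - (pycomb (n - x + 1) (j + 1) - pycomb (n - d) (j + 1)) := by omega
      rw [this]
    · -- exit: the digit is x - 1
      rw [not_le] at hcond
      have e : n - (x - 1) = n - x + 1 := by ring
      have e2 : n - (x - 1) - 1 = n - x := by ring
      refine ⟨x - 1, ?_, by omega, by omega, ?_, ?_⟩
      · rw [e]
        have : r - (pycomb (n - x + 1) (j + 1) - pycomb (n - x + 1) (j + 1)) = r := by ring
        rw [this]
        have : x - 1 + 1 = x := by ring
        rw [this]
      · rw [e]; omega
      · rw [e]
        have e3 : n - x + 1 - 1 = n - x := by ring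
        rw [e3]; omega

-- binary search when the predicate is false on the whole bracket: collapses to the left end
lemma binsearch_all_false (n jp t : Int) :
    ∀ (fuel : Nat) (lo b : Int), (∀ e : Int, lo ≤ e → pycomb (n - e) jp < t) →
      binsearch n jp t fuel lo b = lo := by
  intro fuel
  induction fuel with
  | zero => intro lo b _; rfl
  | succ f ih =>
    intro lo b h
    simp only [binsearch]
    split_ifs with h1 h2
    · exfalso
      have hb : lo + 1 ≤ PySem.Int.floordiv (lo + 1 + b) 2 ∧
          PySem.Int.floordiv (lo + 1 + b) 2 ≤ b :=
        PySem.Int.floordiv_two_mid_bounds (by omega)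
      have he : lo + b + 1 = lo + 1 + b := by ring
      rw [he] at h2
      have := h (PySem.Int.floordiv (lo + 1 + b) 2) (by omega)
      omega
    · have he : lo + b + 1 = lo + 1 + b := by ring
      rw [he]
      exact ih lo _ h
    · rfl

-- binary search finds the unique d with target ≤ C(n-d) and C(n-(d+1)) < target
lemma binsearch_finds (n jp t d : Int)
    (hd : t ≤ pycomb (n - d) jp) (hd1 : pycomb (n - (d + 1)) jp < t) :
    ∀ (fuel : Nat) (a b : Int), a ≤ d → d ≤ b → (b - a).toNat + 1 ≤ fuel →
      binsearch n jp t fuel a b = d := by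
  intro fuel
  induction fuel with
  | zero => intro a b _ _ hf; omega
  | succ f ih =>
    intro a b ha hb hf
    simp only [binsearch]
    split_ifs with h1 h2
    · -- predicate holds at mid: go right
      have hmid : a + 1 ≤ PySem.Int.floordiv (a + 1 + b) 2 ∧
          PySem.Int.floordiv (a + 1 + b) 2 ≤ b :=
        PySem.Int.floordiv_two_mid_bounds (by omega)
      have he : a + b + 1 = a + 1 + b := by ring
      rw [he] at h2 ⊢
      have hmd : PySem.Int.floordiv (a + 1 + b) 2 ≤ d := by
        by_contra hc
        have : pycomb (n - PySem.Int.floordiv (a + 1 + b) 2) jp ≤ pycomb (n - (d + 1)) jp :=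
          pycomb_mono_left jp (by omega)
        omega
      exact ih _ b hmd hb (by omega)
    · -- predicate fails at mid: go left
      have hmid : a + 1 ≤ PySem.Int.floordiv (a + 1 + b) 2 ∧
          PySem.Int.floordiv (a + 1 + b) 2 ≤ b :=
        PySem.Int.floordiv_two_mid_bounds (by omega)
      have he : a + b + 1 = a + 1 + b := by ring
      rw [he] at h2 ⊢
      have hmd : d ≤ PySem.Int.floordiv (a + 1 + b) 2 - 1 := by
        by_contra hc
        have : pycomb (n - d) jp ≤ pycomb (n - PySem.Int.floordiv (a + 1 + b) 2) jp :=
          pycomb_mono_left jp (by omega)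
        omega
      exact ih a _ ha hmd (by omega)
    · omega

-- the two outer loops agree digit by digit
lemma go_eq (n : Int) : ∀ (m : Nat) (R lo : Int), 0 ≤ lo → lo + (m : Int) ≤ n →
    R < pycomb (n - lo) (m : Int) →
    unrankA_go n m R (lo + 1) = unrankB_go n m R lo := by
  intro m
  induction m with
  | zero => intro R lo _ _ _; rfl
  | succ m ih =>
    intro R lo h0 h1 h2
    push_cast at h1 h2
    simp only [unrankA_go, unrankB_go]
    by_cases hR : R < 0
    · -- negative rank: A's while exits at once, B's bracket predicate is everywhere false
      have hA : unrankA_while n (m : Int) ((n - (lo + 1) + 1).toNat + 1) R (lo + 1) = (R, lo + 1) := by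
        simp only [unrankA_while]
        rw [if_neg]
        have := pycomb_nonneg (n - (lo + 1)) (m : Int)
        omega
      have hB : binsearch n ((m : Int) + 1) (pycomb (n - lo) ((m : Int) + 1) - R)
          ((n - (m : Int) - 1 - lo).toNat + 1) lo (n - (m : Int) - 1) = lo := by
        apply binsearch_all_false
        intro e he
        have := pycomb_mono_left (a := n - e) (b := n - lo) ((m : Int) + 1) (by omega)
        omega
      rw [hA, hB]
      simp only [sub_self, sub_zero]
      have he1 : lo + 1 - 1 = lo := by ring
      rw [he1]
      congr 1
      apply ih R (lo + 1) (by omega) (by omega)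
      have := pycomb_nonneg (n - (lo + 1)) (m : Int)
      omega
    · rw [not_lt] at hR
      have e : n - (lo + 1) + 1 = n - lo := by ring
      have h2' : R < pycomb (n - (lo + 1) + 1) ((m : Int) + 1) := by rw [e]; exact h2
      obtain ⟨d, heq, hd1, hd2, hd3, hd4⟩ :=
        Awhile_spec n (m : Int) (by omega) ((n - (lo + 1) + 1).toNat + 1) R (lo + 1)
          hR h2' (by omega) (by omega)
      have he0 : n - (lo + 1) + 1 = n - lo := e
      rw [he0] at hd3 hd4
      have hpas : pycomb (n - d) ((m : Int) + 1)
          = pycomb (n - d - 1) (m : Int) + pycomb (n - d - 1) ((m : Int) + 1) := by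
        have := pycomb_pascal (m := n - d) (j := (m : Int)) (by omega) (by omega)
        have e2 : n - d - 1 = n - d - 1 := rfl
        exact this
      have hB : binsearch n ((m : Int) + 1) (pycomb (n - lo) ((m : Int) + 1) - R)
          ((n - (m : Int) - 1 - lo).toNat + 1) lo (n - (m : Int) - 1) = d := by
        apply binsearch_finds
        · omega
        · have e3 : n - (d + 1) = n - d - 1 := by ring
          rw [e3]; omega
        · omega
        · exact hd2
        · omega
      rw [heq, hB, e]
      have he2 : d + 1 - 1 = d := by ring
      rw [he2]
      congr 1
      have e4 : n - (d + 1) = n - d - 1 := by ring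
      apply ih _ (d + 1) (by omega) (by omega)
      rw [e4]; omega

-- ===== VERDICT (by name: the statement is the Claim_ definition above) =====
theorem unrank_lex_spec : Claim_equal_unrank_lex := by
  intro r k n _ hpre
  unfold Spec_unrank_lex unrank_lex unrank_lex_alt
  rcases hpre with hk | ⟨hkn, hr⟩
  · have : k.toNat = 0 := by omega
    rw [this]; rfl
  · by_cases hk0 : k ≤ 0
    · have : k.toNat = 0 := by omega
      rw [this]; rfl
    · have h1 : (0 : Int) + (k.toNat : Int) ≤ n := by omega
      have h2 : r < pycomb (n - 0) ((k.toNat : Int)) := by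
        unfold pycomb
        rw [sub_zero, Int.toNat_natCast]
        exact hr
      have := go_eq n k.toNat r 0 le_rfl h1 h2
      simpa using this
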